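-- pv_equiv track=rewrite | github.com/Mujoung-Kim/DataStructure_Study | Algorithm_Code/example/lv_1/paint_over.py | solution
-- ===== SOURCE A (Python) =====
-- def solution(n, m, section) :
--     result = 0
--
--     if m > section[len(section) - 1] - section[0] :
--         result = n // m
--     else :
--         for val in section :
--             for v in list(range(1, n)) :
--                 if val in list(range(v, m)) :
--                     result += 1
--
--     return result
-- ===== SOURCE B (Python) =====
-- def solution(n, m, section):
--     if m > section[-1] - section[0]:
--         return n // m
--     return sum(max(0, min(val, n - 1)) for val in section if val < m)
-- ===== Notes on version B (the rewrite author's own statement) =====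
-- stated objective: faster
-- what changed: Replaced the nested loops over range(1,n) and range(v,m) membership tests by the closed form sum(max(0, min(val, n-1)) for val in section if val < m), one pass over section.
import Mathlib
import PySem

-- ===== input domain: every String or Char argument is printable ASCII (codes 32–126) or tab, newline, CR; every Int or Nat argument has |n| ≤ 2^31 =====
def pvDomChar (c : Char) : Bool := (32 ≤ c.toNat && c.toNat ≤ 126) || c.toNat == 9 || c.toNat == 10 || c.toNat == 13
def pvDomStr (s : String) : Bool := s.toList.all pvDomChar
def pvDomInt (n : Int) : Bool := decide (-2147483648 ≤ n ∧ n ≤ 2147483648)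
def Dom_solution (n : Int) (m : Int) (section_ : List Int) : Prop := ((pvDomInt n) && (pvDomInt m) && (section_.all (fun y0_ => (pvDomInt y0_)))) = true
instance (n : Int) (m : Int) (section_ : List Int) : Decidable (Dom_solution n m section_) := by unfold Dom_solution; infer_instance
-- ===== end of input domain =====

-- B replaces A's nested loops over range(1,n) / range(v,m) membership by a one-pass closed-form
-- sum over section (objective: faster, asymptotically).

-- ===== PORT A =====
def solution (n : Int) (m : Int) (section_ : List Int) : Int :=
  -- if m > section[len(section)-1] - section[0]
  if m > PySem.List.pyGetD section_ ((section_.length : Int) - 1) 0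
          - PySem.List.pyGetD section_ 0 0 then
    PySem.Int.floordiv n m
  else
    section_.foldl (fun result val =>
      (PySem.List.pyRange 1 n 1).foldl (fun r v =>
        if val ∈ PySem.List.pyRange v m 1 then r + 1 else r) result) 0

-- ===== PORT B =====
def solution_alt (n : Int) (m : Int) (section_ : List Int) : Int :=
  -- if m > section[-1] - section[0]
  if m > PySem.List.pyGetD section_ (-1) 0 - PySem.List.pyGetD section_ 0 0 then
    PySem.Int.floordiv n m
  else
    ((section_.filter (fun val => val < m)).map (fun val => max 0 (min val (n - 1)))).sum

-- ===== PRECONDITION & SPEC =====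
-- Pre_ excludes exactly the inputs where A raises: the empty list (IndexError on section[-1]),
-- and m = 0 with the first branch taken (ZeroDivisionError on n // m); B raises there too.
def Pre_solution (n : Int) (m : Int) (section_ : List Int) : Prop :=
  section_ ≠ [] ∧ (m = 0 → m ≤ section_.getLastD 0 - section_.headD 0)
instance (n : Int) (m : Int) (section_ : List Int) : Decidable (Pre_solution n m section_) := by
  unfold Pre_solution; infer_instance
def pvWitness_solution : Int × Int × List Int := (8, 4, [2, 3, 6])

def Spec_solution (n : Int) (m : Int) (section_ : List Int) (out : Int) : Prop := out = solution_alt n m section_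
instance (n : Int) (m : Int) (section_ : List Int) (out : Int) : Decidable (Spec_solution n m section_ out) := by unfold Spec_solution; infer_instance

-- ===== CLAIM (what is proved, stated in full; the proofs are below) =====
def Claim_equal_solution : Prop := ∀ (n : Int) (m : Int) (section_ : List Int), Dom_solution n m section_ → Pre_solution n m section_ → Spec_solution n m section_ (solution n m section_)

-- ===== LEMMAS AND PROOFS =====

-- section[len(section)-1] and section[-1] agree on a nonempty list
theorem pyGetD_len_sub_one {s : List Int} (h : s ≠ []) :
    PySem.List.pyGetD s ((s.length : Int) - 1) 0 = PySem.List.pyGetD s (-1) 0 := by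
  have hpos : 0 < s.length := List.length_pos_iff.mpr h
  rw [PySem.List.pyGetD_neg_one s 0 h,
      PySem.List.pyGetD_eq_getElem s 0 (by omega) (by omega),
      List.getLast_eq_getElem]
  congr 1
  omega

-- counting k < t over range N
theorem countP_range_lt (N t : Nat) :
    (List.range N).countP (fun k => decide (k < t)) = min N t := by
  induction N with
  | zero => simp
  | succ N ih =>
    rw [List.range_succ, List.countP_append, ih]
    by_cases h : N < t <;> simp [h] <;> omega

-- the two nested loops of A compute, for each val, the closed form of B
theorem inner_loop_eq (n m val r : Int) :
    (PySem.List.pyRange 1 n 1).foldl (fun r v =>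
        if val ∈ PySem.List.pyRange v m 1 then r + 1 else r) r
      = r + (if val < m then max 0 (min val (n - 1)) else 0) := by
  have hmem : ∀ v : Int, (val ∈ PySem.List.pyRange v m 1)
      = (decide (v ≤ val) && decide (val < m)) := by
    intro v
    simp [PySem.List.mem_pyRange_one, decide_eq_true_eq, Bool.and_eq_true]
  calc (PySem.List.pyRange 1 n 1).foldl (fun r v =>
        if val ∈ PySem.List.pyRange v m 1 then r + 1 else r) r
      = (PySem.List.pyRange 1 n 1).foldl (fun r v =>
        if (decide (v ≤ val) && decide (val < m)) = true then r + 1 else r) r := by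
        simp only [hmem]
    _ = r + ((PySem.List.pyRange 1 n 1).countP
          (fun v => decide (v ≤ val) && decide (val < m)) : Int) := by
        exact PySem.List.foldl_count_if _ _ r
    _ = r + (if val < m then max 0 (min val (n - 1)) else 0) := by
        congr 1
        by_cases hm : val < m
        · rw [if_pos hm, PySem.List.pyRange_one, List.countP_map]
          have : ((fun v => decide (v ≤ val) && decide (val < m)) ∘ fun k : Nat => 1 + (k : Int))
              = fun k : Nat => decide (k < val.toNat) := by
            funext k
            simp only [Function.comp, hm, decide_true, Bool.and_true, decide_eq_decide]
            omega
          rw [this, countP_range_lt]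
          omega
        · rw [if_neg hm]
          have : ((PySem.List.pyRange 1 n 1).countP
              (fun v => decide (v ≤ val) && decide (val < m))) = 0 := by
            apply List.countP_eq_zero.mpr
            intro v _
            simp [hm]
          rw [this]; rfl

-- the outer loop of A equals B's filtered-map sum
theorem outer_loop_eq (n m : Int) (s : List Int) (r : Int) :
    s.foldl (fun result val =>
      (PySem.List.pyRange 1 n 1).foldl (fun r v =>
        if val ∈ PySem.List.pyRange v m 1 then r + 1 else r) result) r
      = r + ((s.filter (fun val => val < m)).map (fun val => max 0 (min val (n - 1)))).sum := by
  induction s generalizing r with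
  | nil => simp
  | cons x xs ih =>
    rw [List.foldl_cons, ih, inner_loop_eq]
    by_cases h : x < m <;> simp [h] <;> ring

-- ===== VERDICT (by name: the statement is the Claim_ definition above) =====
theorem solution_spec : Claim_equal_solution := by
  intro n m s _ hpre
  unfold Spec_solution solution solution_alt
  rw [pyGetD_len_sub_one hpre.1]
  by_cases hb : m > PySem.List.pyGetD s (-1) 0 - PySem.List.pyGetD s 0 0
  · simp [hb]
  · simp only [hb, if_false]
    rw [outer_loop_eq]
    ring
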